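-- pv_equiv track=rewrite | github.com/byWhale/second-reader | reading-companion-backend/eval/attentional_v2/run_closed_loop_benchmark_curation.py | normalized_stage_history
-- ===== SOURCE A (Python) =====
-- STAGES = (
--     "construct_dataset",
--     "export_review_packets",
--     "audit_packets",
--     "adjudicate_packets",
--     "import_packets",
--     "repair_open_backlog",
--     "refresh_queue_summary",
--     "final_summary",
-- )
--
-- def normalized_stage_history(values: list[str] | tuple[str, ...]) -> list[str]:
--     seen: set[str] = set()
--     requested: list[str] = []
--     extras: list[str] = []
--     stage_order = {stage: index for index, stage in enumerate(STAGES)}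
--     for value in values:
--         stage = str(value).strip()
--         if not stage or stage in seen:
--             continue
--         seen.add(stage)
--         if stage in stage_order:
--             requested.append(stage)
--         else:
--             extras.append(stage)
--     requested.sort(key=lambda stage: stage_order[stage])
--     return requested + extras
-- ===== SOURCE B (Python) =====
-- STAGES = (
--     "construct_dataset",
--     "export_review_packets",
--     "audit_packets",
--     "adjudicate_packets",
--     "import_packets",
--     "repair_open_backlog",
--     "refresh_queue_summary",
--     "final_summary",
-- )
--
-- def normalized_stage_history(values):
--     # staged passes: normalize & drop empties, dedup first occurrences via
--     # dict.fromkeys, then split by membership in the canonical STAGES tuple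
--     cleaned = [s for s in (str(v).strip() for v in values) if s]
--     uniq = list(dict.fromkeys(cleaned))
--     return [s for s in STAGES if s in uniq] + [s for s in uniq if s not in STAGES]
-- ===== Notes on version B (the rewrite author's own statement) =====
-- stated objective: idiomatic
-- what changed: Replaces the single seen-set pass that splits into requested/extras and then sorts requested by a stage->index dict with staged passes: normalize and drop empties, dedup first occurrences with dict.fromkeys, then emit STAGES filtered by membership followed by the non-stage leftovers, eliminating the sort and the index dict.
import Mathlib
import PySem

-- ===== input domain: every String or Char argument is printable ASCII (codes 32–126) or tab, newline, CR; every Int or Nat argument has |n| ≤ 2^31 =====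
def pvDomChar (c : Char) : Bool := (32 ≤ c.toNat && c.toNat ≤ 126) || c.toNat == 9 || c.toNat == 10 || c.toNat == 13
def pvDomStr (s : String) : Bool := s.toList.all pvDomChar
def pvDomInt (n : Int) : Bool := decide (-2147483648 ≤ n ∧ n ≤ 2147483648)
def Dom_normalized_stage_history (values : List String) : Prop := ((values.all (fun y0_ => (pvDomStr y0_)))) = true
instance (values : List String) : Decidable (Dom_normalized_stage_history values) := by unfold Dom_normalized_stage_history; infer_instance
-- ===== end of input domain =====

-- B replaces A's seen-set pass with sort-by-index-dict by three staged passes: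
-- normalize, list-based first-occurrence dedup, then split by membership in STAGES.

def pvSTAGES : List String :=
  ["construct_dataset", "export_review_packets", "audit_packets", "adjudicate_packets",
   "import_packets", "repair_open_backlog", "refresh_queue_summary", "final_summary"]

-- ===== PORT A =====
-- stage_order = {stage: index for index, stage in enumerate(STAGES)}
def pvStageOrder : PySem.Dict String Int :=
  (PySem.List.enumerate pvSTAGES).foldl (fun d p => d.insert p.2 p.1) PySem.Dict.empty

-- the body of A's 'for value in values' loop, state (seen, requested, extras)
def pvLoopA : (PySem.Set String × List String × List String) → String → (PySem.Set String × List String × List String) :=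
  fun acc value =>
    let stage := PySem.Str.strip value
    if stage = "" ∨ PySem.Set.contains acc.1 stage then acc
    else
      let seen := PySem.Set.add acc.1 stage
      if pvStageOrder.contains stage then (seen, acc.2.1 ++ [stage], acc.2.2)
      else (seen, acc.2.1, acc.2.2 ++ [stage])

def normalized_stage_history (values : List String) : List String :=
  let st := values.foldl pvLoopA (PySem.Set.empty, [], [])
  -- requested.sort(key=lambda s: stage_order[s]): every element of requested is a key of
  -- stage_order, so the total lookup getD _ 0 is exact here
  PySem.List.sorted st.2.1 (fun s => pvStageOrder.getD s 0) false ++ st.2.2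

-- ===== PORT B =====
def normalized_stage_history_alt (values : List String) : List String :=
  -- cleaned = [s for s in (str(v).strip() for v in values) if s]
  let cleaned := (values.map (fun v => PySem.Str.strip v)).filter (fun s => decide (s ≠ ""))
  -- uniq = list(dict.fromkeys(cleaned))
  let uniq := PySem.List.dedup cleaned
  pvSTAGES.filter (fun s => decide (s ∈ uniq)) ++ uniq.filter (fun s => decide (s ∉ pvSTAGES))

-- ===== PRECONDITION & SPEC =====
def Spec_normalized_stage_history (values : List String) (out : List String) : Prop := out = normalized_stage_history_alt values
instance (values : List String) (out : List String) : Decidable (Spec_normalized_stage_history values out) := by unfold Spec_normalized_stage_history; infer_instance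

-- ===== CLAIM (what is proved, stated in full; the proofs are below) =====
def Claim_equal_normalized_stage_history : Prop := ∀ (values : List String), Dom_normalized_stage_history values → Spec_normalized_stage_history values (normalized_stage_history values)

-- ===== LEMMAS AND PROOFS =====

-- proof-only fold combining B's empty-skip and first-occurrence dedup in one step
def pvDedupStep (acc : List String) (s : String) : List String :=
  if s ≠ "" ∧ s ∉ acc then acc ++ [s] else acc

-- B's dedup-of-nonempty equals the combined fold
theorem dedupStep_filter (l : List String) (u : List String) :
    l.foldl pvDedupStep u = (l.filter (fun s => decide (s ≠ ""))).foldl PySem.Set.add u := by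
  induction l generalizing u with
  | nil => rfl
  | cons s t ih =>
    by_cases h : s = ""
    · simp only [List.foldl_cons, List.filter_cons]
      simp [h, pvDedupStep, ih]
    · have hstep : pvDedupStep u s = PySem.Set.add u s := by
        by_cases hm : s ∈ u
        · have : PySem.Set.contains u s = true := (PySem.Set.contains_iff _ _).mpr hm
          simp [pvDedupStep, PySem.Set.add, h, hm]
        · have : PySem.Set.contains u s = false := by
            cases hx : PySem.Set.contains u s
            · rfl
            · exact absurd ((PySem.Set.contains_iff _ _).mp hx) hm
          simp [pvDedupStep, PySem.Set.add, h, hm]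
      simp only [List.foldl_cons, List.filter_cons]
      simp [h, hstep, ih]

-- membership in A's stage_order dict is membership in the STAGES list
theorem stageOrder_contains_iff (s : String) :
    pvStageOrder.contains s = true ↔ s ∈ pvSTAGES := by
  rw [PySem.Dict.contains_eq_decide_mem_keys]
  have h : pvStageOrder.keys = pvSTAGES := by decide
  simp [h]

-- adding one fresh element of a nodup list to the filter predicate appends it (up to Perm)
theorem filter_add_perm {p p' : String → Bool} (xs : List String) (a : String)
    (hnd : xs.Nodup) (ha : a ∈ xs) (hpa : p a = false)
    (hp' : ∀ s, p' s = (p s || s == a)) :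
    (xs.filter p').Perm (xs.filter p ++ [a]) := by
  induction xs with
  | nil => cases ha
  | cons x t ih =>
    rcases List.nodup_cons.mp hnd with ⟨hx, hnt⟩
    by_cases hxa : x = a
    · subst hxa
      have h1 : p' x = true := by simp [hp']
      have h2 : List.filter p' t = List.filter p t := by
        apply List.filter_congr
        intro s hs
        have : s ≠ x := fun he => hx (he ▸ hs)
        simp [hp', this]
      simp [h1, h2, hpa]
      exact (List.perm_append_singleton x (List.filter p t)).symm
    · have ht : a ∈ t := by
        rcases List.mem_cons.mp ha with h | h
        · exact absurd h.symm hxa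
        · exact h
      have h1 : p' x = p x := by simp [hp', hxa]
      by_cases hpx : p x = true
      · simpa [List.filter_cons, h1, hpx] using (ih hnt ht).cons x
      · simp at hpx
        simpa [List.filter_cons, h1, hpx] using ih hnt ht

theorem contains_add_eq (seen : PySem.Set String) (x y : String) :
    PySem.Set.contains (PySem.Set.add seen x) y
      = (PySem.Set.contains seen y || y == x) := by
  by_cases h : y = x
  · subst h
    simp [PySem.Set.mem_add]
  · have : (y == x) = false := by simp [h]
    simp only [this, Bool.or_false]
    by_cases hy : y ∈ seen
    · simp [PySem.Set.mem_add, hy]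
    · simp [PySem.Set.mem_add, hy, h]

-- loop invariant: running A's fold from a state that matches B's dedup list u keeps
-- requested a permutation of STAGES filtered by u-membership and extras equal to the
-- non-stage part of u, where u evolves by B's dedup step on the stripped values
theorem loop_inv (values : List String) (seen : PySem.Set String)
    (req ext : List String) (u : List String)
    (hmem : ∀ s, PySem.Set.contains seen s = decide (s ∈ u))
    (hreq : req.Perm (pvSTAGES.filter (fun s => decide (s ∈ u))))
    (hext : ext = u.filter (fun s => decide (s ∉ pvSTAGES))) :
    (values.foldl pvLoopA (seen, req, ext)).2.1.Perm
      (pvSTAGES.filter (fun s =>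
        decide (s ∈ values.foldl (fun acc v => pvDedupStep acc (PySem.Str.strip v)) u))) ∧
    (values.foldl pvLoopA (seen, req, ext)).2.2
      = (values.foldl (fun acc v => pvDedupStep acc (PySem.Str.strip v)) u).filter
          (fun s => decide (s ∉ pvSTAGES)) := by
  induction values generalizing seen req ext u with
  | nil => exact ⟨hreq, hext⟩
  | cons v t ih =>
    simp only [List.foldl_cons]
    by_cases hskip : PySem.Str.strip v = "" ∨ PySem.Str.strip v ∈ u
    · have hA : pvLoopA (seen, req, ext) v = (seen, req, ext) := by
        rcases hskip with he | hm
        · simp [pvLoopA, he]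
        · have hms : PySem.Str.strip v ∈ seen := by
            have : PySem.Set.contains seen (PySem.Str.strip v) = true := by
              rw [hmem]; simp [hm]
            exact (PySem.Set.contains_iff _ _).mp this
          simp [pvLoopA, hms]
      have hB : pvDedupStep u (PySem.Str.strip v) = u := by
        rcases hskip with he | hm
        · simp [pvDedupStep, he]
        · simp [pvDedupStep, hm]
      rw [hA]; simp only [hB]
      exact ih seen req ext u hmem hreq hext
    · push Not at hskip
      obtain ⟨hne, hnm⟩ := hskip
      have hconf : PySem.Set.contains seen (PySem.Str.strip v) = false := by
        rw [hmem]; simp [hnm]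
      have hnseen : PySem.Str.strip v ∉ seen := by
        intro h
        rw [(PySem.Set.contains_iff _ _).mpr h] at hconf
        exact absurd hconf (by simp)
      have hB : pvDedupStep u (PySem.Str.strip v) = u ++ [PySem.Str.strip v] := by
        simp [pvDedupStep, hne, hnm]
      have hmem' : ∀ s, PySem.Set.contains (PySem.Set.add seen (PySem.Str.strip v)) s
          = decide (s ∈ u ++ [PySem.Str.strip v]) := by
        intro s
        rw [contains_add_eq, hmem]
        by_cases h : s = PySem.Str.strip v <;> simp [h, List.mem_append]
      by_cases hk : PySem.Str.strip v ∈ pvSTAGES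
      · have hdk : pvStageOrder.contains (PySem.Str.strip v) = true :=
          (stageOrder_contains_iff _).mpr hk
        have hA : pvLoopA (seen, req, ext) v
            = (PySem.Set.add seen (PySem.Str.strip v), req ++ [PySem.Str.strip v], ext) := by
          simp [pvLoopA, hne, hnseen, hdk]
        rw [hA]; simp only [hB]
        apply ih _ _ _ _ hmem'
        · have hperm := filter_add_perm (p := fun s => decide (s ∈ u))
            (p' := fun s => decide (s ∈ u ++ [PySem.Str.strip v]))
            pvSTAGES (PySem.Str.strip v) (by decide) hk (by simp [hnm])
            (fun s => by by_cases h : s = PySem.Str.strip v <;> simp [h, List.mem_append])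
          exact (hreq.append_right [PySem.Str.strip v]).trans hperm.symm
        · rw [hext, List.filter_append]
          have he1 : List.filter (fun s => decide (s ∉ pvSTAGES)) [PySem.Str.strip v] = [] := by
            simp [hk]
          rw [he1, List.append_nil]
      · have hA : pvLoopA (seen, req, ext) v
            = (PySem.Set.add seen (PySem.Str.strip v), req, ext ++ [PySem.Str.strip v]) := by
          simp [pvLoopA, hne, hnseen, (stageOrder_contains_iff (PySem.Str.strip v)).not.mpr hk]
        rw [hA]; simp only [hB]
        apply ih _ _ _ _ hmem'
        · have hfe : pvSTAGES.filter (fun s => decide (s ∈ u ++ [PySem.Str.strip v]))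
              = pvSTAGES.filter (fun s => decide (s ∈ u)) := by
            apply List.filter_congr
            intro s hs
            have : s ≠ PySem.Str.strip v := fun he => hk (he ▸ hs)
            simp [List.mem_append, this]
          rw [hfe]; exact hreq
        · rw [hext, List.filter_append]
          simp [hk]

-- STAGES is strictly increasing under A's sort key
theorem stages_pairwise : pvSTAGES.Pairwise (fun a b => pvStageOrder.getD a 0 < pvStageOrder.getD b 0) := by decide

-- ===== VERDICT (by name: the statement is the Claim_ definition above) =====
theorem normalized_stage_history_spec : Claim_equal_normalized_stage_history := by
  intro values _
  unfold Spec_normalized_stage_history normalized_stage_history normalized_stage_history_alt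
  obtain ⟨h1, h2⟩ := loop_inv values PySem.Set.empty [] [] []
    (fun s => by simp [PySem.Set.empty, PySem.Set.contains]) (by decide) (by decide)
  show (PySem.List.sorted (List.foldl pvLoopA (PySem.Set.empty, [], []) values).2.1
        (fun s => pvStageOrder.getD s 0) false)
      ++ (List.foldl pvLoopA (PySem.Set.empty, [], []) values).2.2
      = pvSTAGES.filter (fun s =>
          decide (s ∈ PySem.List.dedup ((values.map fun v => PySem.Str.strip v).filter
            (fun s => decide (s ≠ "")))))
        ++ (PySem.List.dedup ((values.map fun v => PySem.Str.strip v).filter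
            (fun s => decide (s ≠ "")))).filter (fun s => decide (s ∉ pvSTAGES))
  simp only [PySem.List.dedup_eq_ofList, PySem.Set.ofList_eq_foldl,
    ← dedupStep_filter, List.foldl_map]
  rw [h2]
  congr 1
  apply PySem.List.sorted_eq_of_perm_of_pairwise_lt
  · exact h1.symm
  · exact stages_pairwise.filter _
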